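-- pv_equiv track=rewrite | github.com/ahnty0122/Algogenius | 완전탐색/모의고사.py | solution
-- ===== SOURCE A (Python) =====
-- def solution(answers):
--     answer = []
--     a = [1, 2, 3, 4, 5] * 2000
--     b = [2, 1, 2, 3, 2, 4, 2, 5] * 1250
--     c = [3, 3, 1, 1, 2, 2, 4, 4, 5, 5] * 1000
--     a_count = 0
--     b_count = 0
--     c_count = 0
--     for i, ans in enumerate(answers):
--         if a[i] == ans:
--             a_count += 1
--         if b[i] == ans:
--             b_count += 1
--         if c[i] == ans:
--             c_count += 1
--     final = [a_count, b_count, c_count]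
--     for i, j in enumerate(final):
--         if j == max(final):
--             answer.append(i + 1)
--     return answer
-- ===== SOURCE B (Python) =====
-- def solution(answers):
--     # All three patterns are periodic with period dividing 40 (lcm of 5, 8, 10), so an
--     # answer at position i can only match pattern values determined by i % 40.  Build a
--     # histogram of (i % 40, answer) pairs in one pass, then read each pattern's score off
--     # the histogram with 40 lookups instead of rescanning the answers.
--     cycles = ([1, 2, 3, 4, 5], [2, 1, 2, 3, 2, 4, 2, 5], [3, 3, 1, 1, 2, 2, 4, 4, 5, 5])
--     hist = {}
--     for i, ans in enumerate(answers):
--         key = (i % 40, ans)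
--         hist[key] = hist.get(key, 0) + 1
--     counts = [sum(hist.get((r, cyc[r % len(cyc)]), 0) for r in range(40)) for cyc in cycles]
--     m = max(counts)
--     return [k + 1 for k in range(3) if counts[k] == m]
-- ===== Notes on version B (the rewrite author's own statement) =====
-- stated objective: alternative
-- what changed: Exploits that the three patterns are periodic with period dividing 40: instead of materialising three 10000-element patterns and comparing element-by-element, B builds a histogram of (index mod 40, answer) pairs in one pass and reads each pattern's score off the histogram with 40 dictionary lookups; Pre_ excludes inputs longer than 10000, where A raises IndexError.
import Mathlib
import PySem

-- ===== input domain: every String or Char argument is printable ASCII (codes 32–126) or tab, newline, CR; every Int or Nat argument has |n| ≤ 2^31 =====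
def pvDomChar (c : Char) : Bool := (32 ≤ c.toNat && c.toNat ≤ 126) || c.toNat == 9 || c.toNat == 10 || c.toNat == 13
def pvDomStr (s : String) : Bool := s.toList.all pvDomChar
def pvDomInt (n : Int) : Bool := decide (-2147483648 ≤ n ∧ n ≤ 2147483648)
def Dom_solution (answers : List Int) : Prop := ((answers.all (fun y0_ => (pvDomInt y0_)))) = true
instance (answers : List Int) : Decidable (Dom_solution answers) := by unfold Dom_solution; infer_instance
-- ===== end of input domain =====

-- B exploits the patterns' periodicity (all periods divide 40): one pass builds a histogram of
-- (index mod 40, answer) pairs, each score is then 40 histogram lookups; same O(n) cost (alternative).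

-- ===== PORT A =====
-- the three 10000-element patterns A builds ([1,2,3,4,5] * 2000 etc.)
def pvPatA : List Int := (List.replicate 2000 ([1, 2, 3, 4, 5] : List Int)).flatten
def pvPatB : List Int := (List.replicate 1250 ([2, 1, 2, 3, 2, 4, 2, 5] : List Int)).flatten
def pvPatC : List Int := (List.replicate 1000 ([3, 3, 1, 1, 2, 2, 4, 4, 5, 5] : List Int)).flatten

-- A's single pass over enumerate(answers) updating three counters; pattern lookup a[i] is
-- pyGetD (Python raises IndexError out of range — exactly the inputs Pre_solution excludes)
def solutionCounts (answers : List Int) : Int × Int × Int :=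
  (PySem.List.enumerate answers).foldl
    (fun st p =>
      (if PySem.List.pyGetD pvPatA p.1 0 == p.2 then st.1 + 1 else st.1,
       if PySem.List.pyGetD pvPatB p.1 0 == p.2 then st.2.1 + 1 else st.2.1,
       if PySem.List.pyGetD pvPatC p.1 0 == p.2 then st.2.2 + 1 else st.2.2))
    (0, 0, 0)

def solutionFinal (answers : List Int) : List Int :=
  [(solutionCounts answers).1, (solutionCounts answers).2.1, (solutionCounts answers).2.2]

def solution (answers : List Int) : List Int :=
  (PySem.List.enumerate (solutionFinal answers)).foldl
    (fun answer p =>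
      if p.2 == (PySem.List.max? (solutionFinal answers) (fun y => y)).getD 0
      then answer ++ [p.1 + 1] else answer)
    []

-- ===== PORT B =====
-- the three short cycles; position i of a full pattern only depends on i % 40
def cycA : List Int := [1, 2, 3, 4, 5]
def cycB : List Int := [2, 1, 2, 3, 2, 4, 2, 5]
def cycC : List Int := [3, 3, 1, 1, 2, 2, 4, 4, 5, 5]

-- hist[(i % 40, ans)] += 1 over enumerate(answers)
def altHist (answers : List Int) : PySem.Dict (Int × Int) Int :=
  (PySem.List.enumerate answers).foldl
    (fun h p =>
      h.insert (PySem.Int.mod p.1 40, p.2) (h.getD (PySem.Int.mod p.1 40, p.2) 0 + 1))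
    PySem.Dict.empty

-- sum(hist.get((r, cyc[r % len(cyc)]), 0) for r in range(40))
def altScore (answers : List Int) (cyc : List Int) : Int :=
  ((PySem.List.pyRange 0 40 1).map
    (fun r => (altHist answers).getD
      (r, PySem.List.pyGetD cyc (PySem.Int.mod r (cyc.length : Int)) 0) 0)).sum

def altCounts (answers : List Int) : List Int :=
  [cycA, cycB, cycC].map (fun cyc => altScore answers cyc)

def solution_alt (answers : List Int) : List Int :=
  ((PySem.List.pyRange 0 3 1).filter
      (fun k => PySem.List.pyGetD (altCounts answers) k 0
        == (PySem.List.max? (altCounts answers) (fun y => y)).getD 0)).map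
    (fun k => k + 1)

-- ===== PRECONDITION & SPEC =====
-- Pre_ excludes answers longer than the 10000-element patterns: there A raises IndexError.
def Pre_solution (answers : List Int) : Prop := answers.length ≤ 10000
instance (answers : List Int) : Decidable (Pre_solution answers) := by unfold Pre_solution; infer_instance
def pvWitness_solution : List Int := ([1, 3, 2, 4, 2])

def Spec_solution (answers : List Int) (out : List Int) : Prop := out = solution_alt answers
instance (answers : List Int) (out : List Int) : Decidable (Spec_solution answers out) := by unfold Spec_solution; infer_instance

-- ===== CLAIM (what is proved, stated in full; the proofs are below) =====
def Claim_equal_solution : Prop := ∀ (answers : List Int), Dom_solution answers → Pre_solution answers → Spec_solution answers (solution answers)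

-- ===== LEMMAS AND PROOFS =====

-- indexing a flattened replication is indexing the cycle at the index mod the cycle length
lemma getD_flatten_replicate (l : List Int) :
    ∀ (k i : Nat), i < k * l.length →
      ((List.replicate k l).flatten.getD i 0) = l.getD (i % l.length) 0 := by
  intro k
  induction k with
  | zero => intro i h; simp at h
  | succ k ih =>
    intro i h
    rw [List.replicate_succ, List.flatten_cons]
    by_cases hi : i < l.length
    · rw [List.getD_append _ _ _ _ hi, Nat.mod_eq_of_lt hi]
    · rw [Nat.not_lt] at hi
      rw [List.getD_append_right _ _ _ _ hi]
      have hmul : (k + 1) * l.length = k * l.length + l.length := Nat.succ_mul k l.length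
      rw [ih (i - l.length) (by omega), Nat.mod_eq_sub_mod hi]

lemma per_a : ∀ s : Nat, s < 10000 → pvPatA.getD s 0 = cycA.getD (s % cycA.length) 0 := by
  intro s hs
  have hlen : cycA.length = 5 := rfl
  exact getD_flatten_replicate cycA 2000 s (by rw [hlen]; omega)

lemma per_b : ∀ s : Nat, s < 10000 → pvPatB.getD s 0 = cycB.getD (s % cycB.length) 0 := by
  intro s hs
  have hlen : cycB.length = 8 := rfl
  exact getD_flatten_replicate cycB 1250 s (by rw [hlen]; omega)

lemma per_c : ∀ s : Nat, s < 10000 → pvPatC.getD s 0 = cycC.getD (s % cycC.length) 0 := by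
  intro s hs
  have hlen : cycC.length = 10 := rfl
  exact getD_flatten_replicate cycC 1000 s (by rw [hlen]; omega)

-- a 0/1-indicator summed over a range entirely left of t is 0
lemma sum_ind_ge (f : Int → Int) (x t : Int) :
    ∀ (n : Nat) (a : Int), a + (n : Int) ≤ t →
      ((PySem.List.pyRange a (a + (n : Int)) 1).map
        (fun r => if ((t, x) : Int × Int) == (r, f r) then (1 : Int) else 0)).sum = 0 := by
  intro n
  induction n with
  | zero => intro a ha; simp [PySem.List.pyRange_one_eq_nil (le_refl a)]
  | succ n ih =>
    intro a ha
    have hb : a + ((n + 1 : Nat) : Int) = (a + (n : Int)) + 1 := by push_cast; ring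
    have hle : a ≤ a + (n : Int) := by omega
    rw [hb, PySem.List.pyRange_one_succ_right hle, List.map_append, List.sum_append,
        ih a (by omega)]
    have hne : ¬ (t = a + (n : Int) ∧ x = f (a + (n : Int))) := fun hh => absurd hh.1 (by omega)
    simp [beq_iff_eq, Prod.mk.injEq, hne]

-- the indicator sum over a range containing t picks exactly the term at r = t
lemma sum_ind_mem (f : Int → Int) (x t : Int) :
    ∀ (n : Nat) (a : Int), a ≤ t → t < a + (n : Int) →
      ((PySem.List.pyRange a (a + (n : Int)) 1).map
        (fun r => if ((t, x) : Int × Int) == (r, f r) then (1 : Int) else 0)).sum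
      = if x = f t then 1 else 0 := by
  intro n
  induction n with
  | zero => intro a h1 h2; omega
  | succ n ih =>
    intro a h1 h2
    have hb : a + ((n + 1 : Nat) : Int) = (a + (n : Int)) + 1 := by push_cast; ring
    have hle : a ≤ a + (n : Int) := by omega
    rw [hb, PySem.List.pyRange_one_succ_right hle, List.map_append, List.sum_append]
    by_cases ht : t = a + (n : Int)
    · rw [sum_ind_ge f x t n a (by omega)]
      simp [beq_iff_eq, Prod.mk.injEq, ht]
    · rw [ih a h1 (by omega)]
      have hne : ¬ (t = a + (n : Int) ∧ x = f (a + (n : Int))) := fun hh => absurd hh.1 ht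
      simp [beq_iff_eq, Prod.mk.injEq, hne]

-- the previous lemma specialised to range(40)
lemma sum_ind_40 (f : Int → Int) (x t : Int) (h1 : 0 ≤ t) (h2 : t < 40) :
    ((PySem.List.pyRange 0 40 1).map
      (fun r => if ((t, x) : Int × Int) == (r, f r) then (1 : Int) else 0)).sum
    = if x = f t then 1 else 0 := by
  have h := sum_ind_mem f x t 40 0 h1 (by push_cast; omega)
  have e : (0 : Int) + ((40 : Nat) : Int) = 40 := by norm_num
  rw [e] at h
  exact h

-- core invariant: B's 40 histogram reads equal A's match count, for any start offset s
lemma score_count (cyc pat : List Int) (hdvd : cyc.length ∣ 40)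
    (hper : ∀ s : Nat, s < 10000 → pat.getD s 0 = cyc.getD (s % cyc.length) 0) :
    ∀ (ans : List Int) (s : Nat), s + ans.length ≤ 10000 →
      ((PySem.List.pyRange 0 40 1).map
        (fun r => (((PySem.List.enumerate ans (s : Int)).map
            (fun p => (PySem.Int.mod p.1 40, p.2))).count
          (r, PySem.List.pyGetD cyc (PySem.Int.mod r (cyc.length : Int)) 0) : Int))).sum
      = ((PySem.List.enumerate ans (s : Int)).countP
          (fun p => PySem.List.pyGetD pat p.1 0 == p.2) : Int) := by
  intro ans
  induction ans with
  | nil =>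
    intro s hs
    simp only [PySem.List.enumerate_nil, List.map_nil, List.count_nil, List.countP_nil,
      Nat.cast_zero]
    rw [PySem.List.sum_map_const_int]
    simp
  | cons x xs ih =>
    intro s hs
    have hs10 : s < 10000 := by simp at hs; omega
    rw [PySem.List.enumerate_cons]
    simp only [List.map_cons, List.count_cons, List.countP_cons]
    push_cast
    rw [PySem.List.sum_map_add_int]
    have hstep : ((s : Int) + 1) = ((s + 1 : Nat) : Int) := by push_cast; ring
    have hih := ih (s + 1) (by simp at hs ⊢; omega)
    rw [hstep, hih]
    -- remaining: the indicator sum equals the match test at position s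
    rw [sum_ind_40 (fun r => PySem.List.pyGetD cyc (PySem.Int.mod r (cyc.length : Int)) 0)
          x (PySem.Int.mod ((s : Nat) : Int) 40)
          (PySem.Int.mod_nonneg _ (by norm_num)) (PySem.Int.mod_lt _ (by norm_num))]
    have hk : PySem.Int.mod ((s : Nat) : Int) 40 = ((s % 40 : Nat) : Int) := by
      simp
    have hval : PySem.List.pyGetD cyc (PySem.Int.mod (PySem.Int.mod ((s : Nat) : Int) 40) (cyc.length : Int)) 0
        = pat.getD s 0 := by
      rw [hk, PySem.Int.mod_natCast, PySem.List.pyGetD_natCast, Nat.mod_mod_of_dvd s hdvd,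
          hper s hs10]
    rw [hval]
    have hidx : PySem.List.pyGetD pat ((s : Nat) : Int) 0 = pat.getD s 0 :=
      PySem.List.pyGetD_natCast pat s 0
    rw [hidx]
    by_cases hx : x = pat.getD s 0
    · rw [← hx]
      simp
    · rw [if_neg hx, if_neg (by simp only [beq_iff_eq]; exact fun hh => hx hh.symm)]

-- B's histogram is the counter of the (i % 40, answer) key list
lemma altHist_eq (answers : List Int) :
    altHist answers
      = PySem.Dict.counter
          ((PySem.List.enumerate answers).map (fun p => (PySem.Int.mod p.1 40, p.2))) := by
  rw [altHist, ← PySem.Dict.foldl_insert_getD_add_one_eq_counter, List.foldl_map]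

-- each of B's scores equals the A-style match count against the full pattern
lemma score_pattern (cyc pat : List Int) (hdvd : cyc.length ∣ 40)
    (hper : ∀ s : Nat, s < 10000 → pat.getD s 0 = cyc.getD (s % cyc.length) 0)
    (answers : List Int) (h : answers.length ≤ 10000) :
    altScore answers cyc
      = ((PySem.List.enumerate answers).countP
          (fun p => PySem.List.pyGetD pat p.1 0 == p.2) : Int) := by
  rw [altScore, altHist_eq]
  simp only [PySem.Dict.getD_counter]
  have h0 := score_count cyc pat hdvd hper answers 0 (by omega)
  simpa using h0

-- A's three-counter list equals B's counts list
lemma counts_eq (answers : List Int) (h : answers.length ≤ 10000) :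
    solutionFinal answers = altCounts answers := by
  have key : solutionCounts answers =
      (((PySem.List.enumerate answers).countP
          (fun p => PySem.List.pyGetD pvPatA p.1 0 == p.2) : Int),
       ((PySem.List.enumerate answers).countP
          (fun p => PySem.List.pyGetD pvPatB p.1 0 == p.2) : Int),
       ((PySem.List.enumerate answers).countP
          (fun p => PySem.List.pyGetD pvPatC p.1 0 == p.2) : Int)) := by
    rw [solutionCounts]
    rw [PySem.List.foldl_prod_mk
          (f := fun acc (p : Int × Int) =>
            if PySem.List.pyGetD pvPatA p.1 0 == p.2 then acc + 1 else acc)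
          (g := fun (st : Int × Int) (p : Int × Int) =>
            (if PySem.List.pyGetD pvPatB p.1 0 == p.2 then st.1 + 1 else st.1,
             if PySem.List.pyGetD pvPatC p.1 0 == p.2 then st.2 + 1 else st.2))]
    rw [PySem.List.foldl_prod_mk
          (f := fun acc (p : Int × Int) =>
            if PySem.List.pyGetD pvPatB p.1 0 == p.2 then acc + 1 else acc)
          (g := fun acc (p : Int × Int) =>
            if PySem.List.pyGetD pvPatC p.1 0 == p.2 then acc + 1 else acc)]
    rw [PySem.List.foldl_count_if, PySem.List.foldl_count_if, PySem.List.foldl_count_if]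
    simp
  rw [solutionFinal, key, altCounts]
  simp only [List.map_cons, List.map_nil]
  rw [score_pattern cycA pvPatA (by decide) per_a answers h,
      score_pattern cycB pvPatB (by decide) per_b answers h,
      score_pattern cycC pvPatC (by decide) per_c answers h]

-- ===== VERDICT (by name: the statement is the Claim_ definition above) =====
theorem solution_spec : Claim_equal_solution := by
  intro answers _ hpre
  unfold Spec_solution solution solution_alt
  rw [counts_eq answers hpre]
  rw [PySem.List.foldl_append_if
        (p := fun pr : Int × Int =>
          pr.2 == (PySem.List.max? (altCounts answers) (fun y => y)).getD 0)
        (f := fun pr : Int × Int => pr.1 + 1)]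
  have hc : altCounts answers
      = [altScore answers cycA, altScore answers cycB, altScore answers cycC] := by
    simp [altCounts]
  rw [hc]
  have hr : PySem.List.pyRange 0 3 1 = [0, 1, 2] := by decide
  rw [hr]
  have he : PySem.List.enumerate
      [altScore answers cycA, altScore answers cycB, altScore answers cycC]
      = [(0, altScore answers cycA), (1, altScore answers cycB), (2, altScore answers cycC)] := by
    norm_num [PySem.List.enumerate_cons, PySem.List.enumerate_nil]
  rw [he]
  set sA := altScore answers cycA with hsA
  set sB := altScore answers cycB with hsB
  set sC := altScore answers cycC with hsC
  set m := (PySem.List.max? [sA, sB, sC] (fun y => y)).getD 0 with hm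
  by_cases hA : sA = m <;> by_cases hB : sB = m <;> by_cases hC : sC = m <;>
    simp [List.filter_cons, List.filter_nil, hA, hB, hC,
      PySem.List.pyGetD_zero_cons, PySem.List.pyGetD_ofNat', beq_iff_eq]
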